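-- pv_equiv track=rewrite | github.com/CharlesBryanJr/coding_interview_questions | longestPeak.py | count_length_left
-- ===== SOURCE A (Python) =====
-- def count_length_left(idx, length, array):
--     if idx <= 0:
--         return length
--     is_decreasing = array[idx] > array[idx - 1]
--     if is_decreasing:
--         length += 1
--     else:
--         return length
--     return count_length_left(idx - 1, length, array)
-- ===== SOURCE B (Python) =====
-- def count_length_left(idx, length, array):
--     while idx > 0 and array[idx] > array[idx - 1]:
--         length += 1
--         idx -= 1
--     return length
-- ===== Notes on version B (the rewrite author's own statement) =====
-- stated objective: idiomatic
-- what changed: Replaced the tail recursion with a single short-circuiting while loop that steps the index left and accumulates the length.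
import Mathlib
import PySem

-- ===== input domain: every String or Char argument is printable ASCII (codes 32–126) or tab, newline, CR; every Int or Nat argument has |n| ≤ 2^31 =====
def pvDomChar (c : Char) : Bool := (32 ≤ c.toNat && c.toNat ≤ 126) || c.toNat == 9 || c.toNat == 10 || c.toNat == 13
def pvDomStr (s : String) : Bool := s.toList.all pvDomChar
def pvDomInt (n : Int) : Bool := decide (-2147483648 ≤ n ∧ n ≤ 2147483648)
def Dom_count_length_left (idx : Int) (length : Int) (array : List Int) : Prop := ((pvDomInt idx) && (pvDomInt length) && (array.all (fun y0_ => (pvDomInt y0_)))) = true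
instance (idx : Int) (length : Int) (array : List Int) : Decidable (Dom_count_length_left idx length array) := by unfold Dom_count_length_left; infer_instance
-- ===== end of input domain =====

-- B replaces A's tail recursion by a single short-circuiting while loop; equivalence on the return value.

-- ===== PORT A =====
-- literal transliteration of A's recursion; array[i] via PySem.List.pyGet? (getD 0 is never
-- reached inside Pre_, where Python does not raise)
def count_length_left (idx : Int) (length : Int) (array : List Int) : Int :=
  if idx ≤ 0 then length
  else
    let is_decreasing := (PySem.List.pyGet? array idx).getD 0 > (PySem.List.pyGet? array (idx - 1)).getD 0
    if is_decreasing then count_length_left (idx - 1) (length + 1) array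
    else length
termination_by idx.toNat
decreasing_by omega

-- ===== PORT B =====
-- the while loop of Source B, as structural recursion on the Nat value of idx (the loop counter)
def cllAltLoop (array : List Int) : Nat → Int → Int
  | 0, len => len
  | n + 1, len =>
    if (PySem.List.pyGet? array ((n : Int) + 1)).getD 0 > (PySem.List.pyGet? array (n : Int)).getD 0
    then cllAltLoop array n (len + 1)
    else len

def count_length_left_alt (idx : Int) (length : Int) (array : List Int) : Int :=
  cllAltLoop array idx.toNat length

-- ===== PRECONDITION & SPEC =====
-- Pre_ excludes exactly the inputs where Python A (and B) raise IndexError: idx > 0 with idx out of range.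
def Pre_count_length_left (idx : Int) (length : Int) (array : List Int) : Prop :=
  idx ≤ 0 ∨ idx < (array.length : Int)
instance (idx : Int) (length : Int) (array : List Int) : Decidable (Pre_count_length_left idx length array) := by unfold Pre_count_length_left; infer_instance

def pvWitness_count_length_left : Int × Int × List Int := (2, 0, [1, 3, 5])

def Spec_count_length_left (idx : Int) (length : Int) (array : List Int) (out : Int) : Prop := out = count_length_left_alt idx length array
instance (idx : Int) (length : Int) (array : List Int) (out : Int) : Decidable (Spec_count_length_left idx length array out) := by unfold Spec_count_length_left; infer_instance

-- ===== CLAIM (what is proved, stated in full; the proofs are below) =====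
def Claim_equal_count_length_left : Prop := ∀ (idx : Int) (length : Int) (array : List Int), Dom_count_length_left idx length array → Pre_count_length_left idx length array → Spec_count_length_left idx length array (count_length_left idx length array)

-- ===== LEMMAS AND PROOFS =====

-- A's recursion computed at idx equals B's loop run for idx.toNat iterations (unconditionally).
theorem cll_eq_loop (array : List Int) : ∀ (n : Nat) (idx length : Int), idx.toNat = n →
    count_length_left idx length array = cllAltLoop array n length := by
  intro n
  induction n with
  | zero =>
    intro idx length h
    have hle : idx ≤ 0 := by omega
    rw [count_length_left]
    simp [hle, cllAltLoop]
  | succ n ih =>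
    intro idx length h
    have hidx : idx = (n : Int) + 1 := by omega
    rw [count_length_left]
    have hstep : ((n : Int) + 1 - 1) = (n : Int) := by ring
    have hpos : ¬ ((n : Int) + 1 ≤ 0) := by omega
    simp only [hidx, hstep, if_neg hpos, cllAltLoop]
    split_ifs with hcmp
    · exact ih (n : Int) (length + 1) (by omega)
    · rfl

theorem count_length_left_spec : Claim_equal_count_length_left := by
  intro idx length array _ _
  unfold Spec_count_length_left count_length_left_alt
  exact cll_eq_loop array idx.toNat idx length rfl
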